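-- pv_equiv track=rewrite | github.com/outris-dev-user/bank-statements | core/analysis/entity_classification.py | infer_category_from_name
-- ===== SOURCE A (Python) =====
-- from typing import Any, Dict, FrozenSet, Iterable, List, Optional, Set, Union
--
-- def infer_category_from_name(
--     entity_name: Optional[str],
--     keywords_by_category: Dict[str, Union[FrozenSet[str], Set[str], Iterable[str]]],
-- ) -> Optional[str]:
--     """Infer a category label from an entity name using a caller-supplied keyword map.
--
--     Returns the first matching category key, or None if no keyword matched.
--     Matching is substring-based, case-insensitive.
--     """
--     if not entity_name:
--         return None
--     name_lower = entity_name.lower()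
--     for category, keywords in keywords_by_category.items():
--         if any(kw in name_lower for kw in keywords):
--             return category
--     return None
-- ===== SOURCE B (Python) =====
-- from typing import Any, Dict, FrozenSet, Iterable, List, Optional, Set, Union
--
--
-- def infer_category_from_name(
--     entity_name: Optional[str],
--     keywords_by_category: Dict[str, Union[FrozenSet[str], Set[str], Iterable[str]]],
-- ) -> Optional[str]:
--     """Infer a category label from an entity name using a caller-supplied keyword map.
--
--     Builds a hash index of the name's substrings (only the keyword lengths) once;
--     each keyword is then a single set lookup instead of a scan over the name.
--     """
--     if not entity_name:
--         return None
--     name_lower = entity_name.lower()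
--     n = len(name_lower)
--     lengths = {len(kw) for kws in keywords_by_category.values() for kw in kws if len(kw) <= n}
--     substrings = {name_lower[i:i + m] for m in lengths for i in range(n - m + 1)}
--     for category, keywords in keywords_by_category.items():
--         if any(kw in substrings for kw in keywords):
--             return category
--     return None
-- ===== Notes on version B (the rewrite author's own statement) =====
-- stated objective: alternative
-- what changed: B precomputes one hash set of the lowercased name's substrings at the keyword lengths, so each keyword test becomes a single set-membership lookup instead of a substring scan over the name per keyword.
import Mathlib
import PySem

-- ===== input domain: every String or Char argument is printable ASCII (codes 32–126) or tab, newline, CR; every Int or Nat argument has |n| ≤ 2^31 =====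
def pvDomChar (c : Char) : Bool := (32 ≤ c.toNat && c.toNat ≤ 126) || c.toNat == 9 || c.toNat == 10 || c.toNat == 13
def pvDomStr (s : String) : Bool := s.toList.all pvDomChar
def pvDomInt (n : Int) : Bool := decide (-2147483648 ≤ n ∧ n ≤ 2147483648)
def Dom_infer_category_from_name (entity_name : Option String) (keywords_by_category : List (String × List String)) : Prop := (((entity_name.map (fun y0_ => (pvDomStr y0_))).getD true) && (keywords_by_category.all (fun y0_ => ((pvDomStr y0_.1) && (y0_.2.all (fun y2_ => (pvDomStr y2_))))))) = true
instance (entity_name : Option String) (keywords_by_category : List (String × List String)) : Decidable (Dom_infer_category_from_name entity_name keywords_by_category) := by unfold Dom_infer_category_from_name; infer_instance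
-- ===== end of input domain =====

-- B replaces the per-keyword substring scan by one precomputed set of the name's substrings at the
-- keyword lengths, so each keyword test is a single set-membership lookup (alternative, not faster).


-- ===== PORT A =====
-- the 'for category, keywords in keywords_by_category.items():' loop with early return
def pvLoopA (name_lower : String) : List (String × List String) → Option String
  | [] => none
  | (category, keywords) :: rest =>
      if keywords.any (fun kw => PySem.Str.isIn kw name_lower) then some category
      else pvLoopA name_lower rest

def infer_category_from_name (entity_name : Option String) (keywords_by_category : List (String × List String)) : Option String :=
  match entity_name with
  | none => none
  | some s =>
      if s = "" then none
      else pvLoopA (PySem.Str.lower s) keywords_by_category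

-- ===== PORT B =====
-- {len(kw) for kws in keywords_by_category.values() for kw in kws if len(kw) <= n}
def pvLengths (n : Int) (keywords_by_category : List (String × List String)) : PySem.Set Int :=
  PySem.Set.ofList
    (keywords_by_category.flatMap
      (fun p => (p.2.filter (fun kw => PySem.Str.len kw ≤ n)).map (fun kw => PySem.Str.len kw)))

-- {name_lower[i:i+m] for m in lengths for i in range(n - m + 1)}  (substrings as List Char)
def pvSubstrings (cs : List Char) (lengths : PySem.Set Int) : PySem.Set (List Char) :=
  PySem.Set.ofList
    (lengths.flatMap
      (fun m => (PySem.List.pyRange 0 ((cs.length : Int) - m + 1) 1).map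
        (fun i => PySem.List.slice cs (some i) (some (i + m)))))

-- the same items() loop, but the keyword test is a set-membership lookup
def pvLoopB (substrings : PySem.Set (List Char)) : List (String × List String) → Option String
  | [] => none
  | (category, keywords) :: rest =>
      if keywords.any (fun kw => PySem.Set.contains substrings kw.toList) then some category
      else pvLoopB substrings rest

def infer_category_from_name_alt (entity_name : Option String) (keywords_by_category : List (String × List String)) : Option String :=
  match entity_name with
  | none => none
  | some s =>
      if s = "" then none
      else
        let name_lower := PySem.Chars.lower s.toList
        let n : Int := (name_lower.length : Int)
        pvLoopB (pvSubstrings name_lower (pvLengths n keywords_by_category)) keywords_by_category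

-- ===== PRECONDITION & SPEC =====
def Spec_infer_category_from_name (entity_name : Option String) (keywords_by_category : List (String × List String)) (out : Option String) : Prop := out = infer_category_from_name_alt entity_name keywords_by_category
instance (entity_name : Option String) (keywords_by_category : List (String × List String)) (out : Option String) : Decidable (Spec_infer_category_from_name entity_name keywords_by_category out) := by unfold Spec_infer_category_from_name; infer_instance

-- ===== CLAIM (what is proved, stated in full; the proofs are below) =====
def Claim_equal_infer_category_from_name : Prop := ∀ (entity_name : Option String) (keywords_by_category : List (String × List String)), Dom_infer_category_from_name entity_name keywords_by_category → Spec_infer_category_from_name entity_name keywords_by_category (infer_category_from_name entity_name keywords_by_category)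

-- ===== LEMMAS AND PROOFS =====

-- every element of the substring index is no longer than the name
theorem pv_substrings_short (cs : List Char) (L : PySem.Set Int) (l : List Char)
    (h : l ∈ pvSubstrings cs L) : l.length ≤ cs.length := by
  unfold pvSubstrings at h
  rw [PySem.Set.mem_ofList] at h
  simp only [List.mem_flatMap, List.mem_map] at h
  obtain ⟨m, -, i, -, rfl⟩ := h
  rw [PySem.List.length_slice]
  have h1 := PySem.List.clampIdx_le cs.length (i + m)
  omega

-- a list whose length is in the index's length set is in the index iff it is an infix of the name
theorem pv_mem_substrings (cs : List Char) (L : PySem.Set Int)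
    (hL : ∀ m ∈ L, 0 ≤ m) (l : List Char) (hl : (l.length : Int) ∈ L) :
    l ∈ pvSubstrings cs L ↔ l <:+: cs := by
  unfold pvSubstrings
  rw [PySem.Set.mem_ofList]
  simp only [List.mem_flatMap, List.mem_map, PySem.List.mem_pyRange_one]
  constructor
  · rintro ⟨m, hm, i, ⟨hi0, -⟩, rfl⟩
    have hm0 := hL m hm
    rw [PySem.List.slice_toNat cs hi0 (by omega)]
    exact ((List.take_prefix _ _).isInfix).trans ((List.drop_suffix _ _).isInfix)
  · rintro ⟨t, u, rfl⟩
    refine ⟨(l.length : Int), hl, (t.length : Int), ⟨by positivity, ?_⟩, ?_⟩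
    · push_cast [List.length_append]; omega
    · rw [PySem.List.slice_toNat _ (by positivity) (by positivity)]
      have h2 : ((t.length : Int) + (l.length : Int)).toNat = t.length + l.length := by omega
      rw [h2, Int.toNat_natCast, List.append_assoc, List.drop_left, Nat.add_sub_cancel_left,
        List.take_left]

-- every collected length is nonnegative
theorem pv_lengths_nonneg (n : Int) (kbc : List (String × List String)) :
    ∀ m ∈ pvLengths n kbc, 0 ≤ m := by
  intro m hm
  unfold pvLengths at hm
  rw [PySem.Set.mem_ofList] at hm
  simp only [List.mem_flatMap, List.mem_map, List.mem_filter] at hm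
  obtain ⟨p, -, kw, -, rfl⟩ := hm
  rw [PySem.Str.len_eq]
  positivity

-- the length of any keyword occurring in kbc that fits in the name is collected
theorem pv_lengths_mem (n : Int) (kbc : List (String × List String)) (p : String × List String)
    (hp : p ∈ kbc) (kw : String) (hkw : kw ∈ p.2) (hfit : PySem.Str.len kw ≤ n) :
    PySem.Str.len kw ∈ pvLengths n kbc := by
  unfold pvLengths
  rw [PySem.Set.mem_ofList]
  simp only [List.mem_flatMap, List.mem_map, List.mem_filter]
  exact ⟨p, hp, kw, ⟨hkw, by simpa using hfit⟩, rfl⟩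

-- per-keyword agreement: substring scan = index lookup (for a keyword occurring in kbc)
theorem pv_isIn_eq_contains (cs : List Char) (kbc : List (String × List String))
    (p : String × List String) (hp : p ∈ kbc) (kw : String) (hkw : kw ∈ p.2) :
    PySem.Str.isIn kw (String.ofList cs) =
      PySem.Set.contains (pvSubstrings cs (pvLengths (cs.length : Int) kbc)) kw.toList := by
  rw [Bool.eq_iff_iff, PySem.Str.isIn_iff_infix, PySem.Set.contains_iff, String.toList_ofList]
  by_cases hfit : kw.toList.length ≤ cs.length
  · rw [pv_mem_substrings cs _ (pv_lengths_nonneg _ _) kw.toList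
      (by simpa [PySem.Str.len_eq] using
        pv_lengths_mem (cs.length : Int) kbc p hp kw hkw (by rw [PySem.Str.len_eq]; exact_mod_cast hfit))]
  · constructor
    · intro h; exact absurd h.length_le hfit
    · intro h; exact absurd (pv_substrings_short _ _ _ h) hfit

-- the two items() loops agree when every keyword test agrees
theorem pv_loop_eq (cs : List Char) (kbc : List (String × List String)) :
    ∀ kbc' : List (String × List String), (∀ p ∈ kbc', p ∈ kbc) →
      pvLoopA (String.ofList cs) kbc' =
        pvLoopB (pvSubstrings cs (pvLengths (cs.length : Int) kbc)) kbc' := by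
  intro kbc' hsub
  induction kbc' with
  | nil => rfl
  | cons hd tl ih =>
      obtain ⟨cat, kws⟩ := hd
      have hmem : (cat, kws) ∈ kbc := hsub _ List.mem_cons_self
      simp only [pvLoopA, pvLoopB, ih (fun p hp => hsub p (List.mem_cons_of_mem _ hp))]
      have : kws.any (fun kw => PySem.Str.isIn kw (String.ofList cs)) =
          kws.any (fun kw =>
            PySem.Set.contains (pvSubstrings cs (pvLengths (cs.length : Int) kbc)) kw.toList) :=
        PySem.List.any_congr_mem (fun kw hkw => pv_isIn_eq_contains cs kbc _ hmem kw hkw)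
      rw [this]

-- ===== VERDICT (by name: the statement is the Claim_ definition above) =====
theorem infer_category_from_name_spec : Claim_equal_infer_category_from_name := by
  intro entity_name kbc _
  unfold Spec_infer_category_from_name infer_category_from_name infer_category_from_name_alt
  match entity_name with
  | none => rfl
  | some s =>
      by_cases hs : s = ""
      · simp [hs]
      · simp only [hs, if_false]
        have h1 : PySem.Str.lower s = String.ofList (PySem.Chars.lower s.toList) := by
          rw [← PySem.Str.toList_lower, String.ofList_toList]
        rw [h1, pv_loop_eq (PySem.Chars.lower s.toList) kbc kbc (fun p hp => hp)]
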